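-- pv_equiv track=rewrite | github.com/pabloschwarzenberg/grader | tema2_ej3/tema2_ej3_15635694.py | suma_n_perf
-- ===== SOURCE A (Python) =====
-- def numero_perfecto(a):
--     i=1
--     suma=0
--     while i<a:
--         if a%i==0:
--           suma+=i
--         i+=1
--     if suma == a:
--         return True
--     else:
--         return False
--
-- def suma_n_perf(n):
--     i=1
--     suman=0
--     while i<n:
--         if numero_perfecto(i) == True:
--             suman+=i
--         i+=1
--     return suman
-- ===== SOURCE B (Python) =====
-- def _proper_div_sum(a):
--     if a <= 1:
--         return 0
--     s = 1
--     i = 2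
--     while i * i <= a:
--         if a % i == 0:
--             s += i
--             j = a // i
--             if j != i:
--                 s += j
--         i += 1
--     return s
--
-- def suma_n_perf(n):
--     total = 0
--     for i in range(2, n):
--         if _proper_div_sum(i) == i:
--             total += i
--     return total
-- ===== Notes on version B (the rewrite author's own statement) =====
-- stated objective: faster
-- what changed: A tests each candidate by summing all divisors with an O(a) trial loop; B sums proper divisors by trial division only up to sqrt(a), adding each small divisor together with its cofactor a//i.
import Mathlib
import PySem

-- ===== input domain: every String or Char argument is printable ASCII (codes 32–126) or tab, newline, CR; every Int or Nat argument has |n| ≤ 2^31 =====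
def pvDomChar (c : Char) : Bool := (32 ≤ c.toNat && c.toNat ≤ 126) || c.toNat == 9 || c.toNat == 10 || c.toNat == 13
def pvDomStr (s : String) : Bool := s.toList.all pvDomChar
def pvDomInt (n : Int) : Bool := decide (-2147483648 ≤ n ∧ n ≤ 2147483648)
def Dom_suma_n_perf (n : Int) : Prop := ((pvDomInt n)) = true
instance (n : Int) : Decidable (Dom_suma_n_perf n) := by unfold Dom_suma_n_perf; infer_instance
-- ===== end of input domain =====

-- B replaces A's O(a) trial-division perfection test by the √a paired-divisor sum (measured asymptotically faster).

-- ===== PORT A =====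
-- inner while loop of numero_perfecto: i = 1 .. a-1, suma += i when a % i == 0
def numero_perfecto (a : Int) : Bool :=
  let suma := (PySem.List.pyRange 1 a 1).foldl
    (fun suma i => if PySem.Int.mod a i = 0 then suma + i else suma) 0
  if suma = a then true else false

def suma_n_perf (n : Int) : Int :=
  (PySem.List.pyRange 1 n 1).foldl
    (fun suman i => if numero_perfecto i = true then suman + i else suman) 0

-- ===== PORT B =====
-- the 'while i*i <= a' loop of _proper_div_sum, fuel-bounded (fuel = a.toNat is enough: i ≤ i*i ≤ a while running)
def pdsLoop (a : Int) : Nat → Int → Int → Int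
  | 0, _, s => s
  | fuel+1, i, s =>
    if i * i ≤ a then
      pdsLoop a fuel (i + 1)
        (if PySem.Int.mod a i = 0 then
          (let j := PySem.Int.floordiv a i
           if j ≠ i then s + i + j else s + i)
         else s)
    else s

def proper_div_sum (a : Int) : Int :=
  if a ≤ 1 then 0 else pdsLoop a a.toNat 2 1

def suma_n_perf_alt (n : Int) : Int :=
  (PySem.List.pyRange 2 n 1).foldl
    (fun total i => if proper_div_sum i = i then total + i else total) 0

-- ===== PRECONDITION & SPEC =====
def Spec_suma_n_perf (n : Int) (out : Int) : Prop := out = suma_n_perf_alt n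
instance (n : Int) (out : Int) : Decidable (Spec_suma_n_perf n out) := by unfold Spec_suma_n_perf; infer_instance

-- ===== CLAIM (what is proved, stated in full; the proofs are below) =====
def Claim_equal_suma_n_perf : Prop := ∀ (n : Int), Dom_suma_n_perf n → Spec_suma_n_perf n (suma_n_perf n)

-- ===== LEMMAS AND PROOFS =====

-- A's naive proper-divisor sum: the inner fold of numero_perfecto
def naiveSum (a : Int) : Int :=
  (PySem.List.pyRange 1 a 1).foldl
    (fun suma i => if PySem.Int.mod a i = 0 then suma + i else suma) 0

lemma numero_perfecto_eq (a : Int) :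
    numero_perfecto a = decide (naiveSum a = a) := by
  simp [numero_perfecto, naiveSum]

-- B's fuel loop, summed: the body runs exactly for the i with i*i ≤ a (squares are monotone for 1 ≤ i)
lemma pdsLoop_eq (a : Int) (fuel : Nat) : ∀ (i s : Int), 1 ≤ i →
    pdsLoop a fuel i s = s + ∑ k ∈ Finset.range fuel,
      (if (i + k) * (i + k) ≤ a then
        (if PySem.Int.mod a (i + k) = 0 then
          (if PySem.Int.floordiv a (i + k) ≠ i + k
            then (i + k) + PySem.Int.floordiv a (i + k) else (i + k))
         else 0)
       else 0) := by
  induction fuel with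
  | zero => intro i s _; simp [pdsLoop]
  | succ fuel ih =>
    intro i s hi
    rw [Finset.sum_range_succ']
    simp only [Nat.cast_add, Nat.cast_one]
    by_cases h : i * i ≤ a
    · rw [pdsLoop, if_pos h, ih (i+1) _ (by omega)]
      have : ∀ k : Nat, i + 1 + (k:Int) = i + ((k:Int)+1) := by intro k; ring
      simp only [this]
      simp only [Nat.cast_zero, add_zero, if_pos h]
      split_ifs with h1 h2 <;> ring
    · rw [pdsLoop, if_neg h]
      have hz : ∀ k ∈ Finset.range fuel,
          (if (i + ((k:Int)+1)) * (i + ((k:Int)+1)) ≤ a then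
            (if PySem.Int.mod a (i + ((k:Int)+1)) = 0 then
              (if PySem.Int.floordiv a (i + ((k:Int)+1)) ≠ i + ((k:Int)+1)
                then (i + ((k:Int)+1)) + PySem.Int.floordiv a (i + ((k:Int)+1)) else (i + ((k:Int)+1)))
             else 0)
           else 0) = 0 := by
        intro k _
        have hk : (0:Int) ≤ (k:Int) := Int.natCast_nonneg k
        rw [if_neg (by nlinarith)]
      rw [Finset.sum_congr rfl hz]
      simp only [Nat.cast_zero, add_zero, if_neg h]
      simp

-- core counting fact in ℕ: the paired √-bounded divisor sum equals the naive proper-divisor sum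
lemma core_sum (N : Nat) (h2 : 2 ≤ N) :
    1 + ∑ j ∈ (Finset.Ico 2 (N.sqrt + 1)).filter (· ∣ N),
          (if N / j ≠ j then j + N / j else j)
      = ∑ i ∈ (Finset.Ico 1 N).filter (· ∣ N), i := by
  set S := (Finset.Ico 2 (N.sqrt + 1)).filter (· ∣ N) with hS
  have hmemS : ∀ j, j ∈ S ↔ 2 ≤ j ∧ j * j ≤ N ∧ j ∣ N := by
    intro j
    rw [hS, Finset.mem_filter, Finset.mem_Ico]
    constructor
    · rintro ⟨⟨a, b⟩, c⟩; exact ⟨a, Nat.le_sqrt.mp (by omega), c⟩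
    · rintro ⟨a, b, c⟩; exact ⟨⟨a, by have := Nat.le_sqrt.mpr b; omega⟩, c⟩
  have hbody : ∀ j ∈ S, (if N / j ≠ j then j + N / j else j)
      = j + (if N / j ≠ j then N / j else 0) := by
    intro j _; split_ifs <;> simp
  rw [Finset.sum_congr rfl hbody, Finset.sum_add_distrib, ← Finset.sum_filter]
  rw [← Finset.sum_filter_add_sum_filter_not ((Finset.Ico 1 N).filter (· ∣ N)) (fun j => j ≤ N.sqrt)]
  have hsmall : ((Finset.Ico 1 N).filter (· ∣ N)).filter (fun j => j ≤ N.sqrt) = insert 1 S := by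
    ext j
    rw [Finset.mem_filter, Finset.mem_filter, Finset.mem_Ico, Finset.mem_insert, hmemS j]
    constructor
    · rintro ⟨⟨⟨h1, hlt⟩, hd⟩, hle⟩
      rcases Nat.lt_or_ge j 2 with h | h
      · left; omega
      · right; exact ⟨h, Nat.le_sqrt.mp hle, hd⟩
    · rintro (rfl | ⟨hj2, hjj, hd⟩)
      · exact ⟨⟨⟨le_refl _, by omega⟩, one_dvd _⟩, Nat.sqrt_pos.mpr (by omega)⟩
      · have hlt : j < N := lt_of_le_of_lt (Nat.le_sqrt.mpr hjj) (Nat.sqrt_lt_self (by omega))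
        exact ⟨⟨⟨by omega, hlt⟩, hd⟩, Nat.le_sqrt.mpr hjj⟩
  have h1S : (1:Nat) ∉ S := by rw [hmemS]; omega
  rw [hsmall, Finset.sum_insert h1S]
  -- the proper divisors above √N are exactly the cofactors N/j of the divisors 2 ≤ j ≤ √N with N/j ≠ j
  have hbig : ∑ i ∈ ((Finset.Ico 1 N).filter (· ∣ N)).filter (fun j => ¬ j ≤ N.sqrt), i
      = ∑ j ∈ S.filter (fun j => N / j ≠ j), N / j := by
    apply Finset.sum_nbij' (i := fun d => N / d) (j := fun j => N / j)
    · intro d hd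
      simp only [Finset.mem_filter, Finset.mem_Ico, not_le] at hd
      obtain ⟨⟨⟨hd1, hdN⟩, hdvd⟩, hsq⟩ := hd
      obtain ⟨c, hc⟩ := hdvd
      have hc' : N = c * d := by rw [hc, Nat.mul_comm]
      have hd0 : 0 < d := by omega
      have hNdc : N / d = c := by rw [hc]; exact Nat.mul_div_cancel_left c hd0
      have hc0 : 0 < c := Nat.pos_of_ne_zero (by rintro rfl; omega)
      have hc1 : c ≠ 1 := by rintro rfl; omega
      have hcd : c < d := by
        have hNlt : N < d * d := Nat.sqrt_lt.mp hsq
        by_contra h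
        have : d * d ≤ d * c := Nat.mul_le_mul (le_refl d) (by omega)
        omega
      have hcc : c * c < N := by
        calc c * c < c * d := (Nat.mul_lt_mul_left hc0).mpr hcd
          _ = N := hc'.symm
      rw [Finset.mem_filter, hmemS, hNdc]
      have hNc : N / c = d := by rw [hc', Nat.mul_div_cancel_left d hc0]
      refine ⟨⟨by omega, le_of_lt hcc, ⟨d, hc'⟩⟩, ?_⟩
      rw [hNc]; omega
    · intro j hj
      rw [Finset.mem_filter, hmemS] at hj
      obtain ⟨⟨hj2, hjj, hjd⟩, hne⟩ := hj
      obtain ⟨c, hc⟩ := hjd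
      have hc' : N = c * j := by rw [hc, Nat.mul_comm]
      have hj0 : 0 < j := by omega
      have hNjc : N / j = c := by rw [hc]; exact Nat.mul_div_cancel_left c hj0
      have hc0 : 0 < c := Nat.pos_of_ne_zero (by rintro rfl; omega)
      rw [hNjc] at hne
      have hjc : j < c := by
        rcases Nat.lt_trichotomy j c with h | h | h
        · exact h
        · exact absurd h.symm hne
        · exfalso
          have : j * c < j * j := (Nat.mul_lt_mul_left hj0).mpr h
          omega
      simp only [Finset.mem_filter, Finset.mem_Ico, not_le, hNjc]
      refine ⟨⟨⟨by omega, ?_⟩, ⟨j, hc'⟩⟩, ?_⟩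
      · have : c * 1 < c * j := (Nat.mul_lt_mul_left hc0).mpr (by omega)
        omega
      · apply Nat.sqrt_lt.mpr
        calc N = j * c := hc
          _ < c * c := (Nat.mul_lt_mul_right hc0).mpr hjc
    · intro d hd
      simp only [Finset.mem_filter, Finset.mem_Ico] at hd
      exact Nat.div_div_self hd.1.2 (by omega)
    · intro j hj
      rw [Finset.mem_filter, hmemS] at hj
      exact Nat.div_div_self hj.1.2.2 (by omega)
    · intro d hd
      simp only [Finset.mem_filter, Finset.mem_Ico] at hd
      exact (Nat.div_div_self hd.1.2 (by omega)).symm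
  rw [hbig]
  ring

-- A's naive sum as a ℕ Finset sum
lemma naiveSum_eq (N : Nat) (h1 : 1 ≤ N) :
    naiveSum (N : Int) = ((∑ i ∈ (Finset.Ico 1 N).filter (· ∣ N), i : Nat) : Int) := by
  unfold naiveSum
  rw [PySem.List.foldl_congr_mem _ _
      (fun s i => s + (if PySem.Int.mod (N : Int) i = 0 then i else 0)) 0
      (by intro acc x _; by_cases h : PySem.Int.mod (N : Int) x = 0 <;> simp [h])]
  rw [PySem.List.foldl_add, PySem.List.pyRange_one, List.map_map]
  have hlen : ((N : Int) - 1).toNat = N - 1 := by omega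
  rw [hlen]
  have hlist : (((List.range (N-1)).map
      ((fun i => if PySem.Int.mod (N : Int) i = 0 then i else 0) ∘ (fun k : Nat => 1 + (k : Int))))).sum
      = ∑ k ∈ Finset.range (N-1), (if PySem.Int.mod (N : Int) (1 + (k : Int)) = 0 then 1 + (k : Int) else 0) := rfl
  rw [hlist, Finset.sum_filter, Finset.sum_Ico_eq_sum_range, zero_add]
  push_cast
  apply Finset.sum_congr rfl
  intro k hk
  have hcast : 1 + (k : Int) = ((1 + k : Nat) : Int) := by push_cast; ring
  rw [hcast]
  simp only [PySem.Int.mod_eq_zero_iff_dvd, Int.natCast_dvd_natCast]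

-- B's √-loop sum as the matching ℕ Finset sum
lemma proper_div_sum_eq (N : Nat) (h2 : 2 ≤ N) :
    proper_div_sum (N : Int)
      = ((1 + ∑ j ∈ (Finset.Ico 2 (N.sqrt + 1)).filter (· ∣ N),
            (if N / j ≠ j then j + N / j else j) : Nat) : Int) := by
  unfold proper_div_sum
  rw [if_neg (by exact_mod_cast by omega : ¬ (N : Int) ≤ 1)]
  have htn : ((N : Int)).toNat = N := by omega
  rw [htn, pdsLoop_eq (N : Int) N 2 1 (by omega)]
  -- extend the √-bounded filtered sum to a guarded sum over Ico 2 (N+2), then shift to range N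
  have hnat : (∑ j ∈ (Finset.Ico 2 (N.sqrt + 1)).filter (· ∣ N),
        (if N / j ≠ j then j + N / j else j))
      = ∑ k ∈ Finset.range N,
        (if (2+k) * (2+k) ≤ N then
          (if (2+k) ∣ N then (if N / (2+k) ≠ 2+k then (2+k) + N / (2+k) else (2+k)) else 0)
         else 0) := by
    rw [Finset.sum_filter]
    have hstep : ∀ j ∈ Finset.Ico 2 (N.sqrt + 1),
        (if j ∣ N then (if N / j ≠ j then j + N / j else j) else 0)
        = (if j * j ≤ N then (if j ∣ N then (if N / j ≠ j then j + N / j else j) else 0) else 0) := by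
      intro j hj
      rw [Finset.mem_Ico] at hj
      rw [if_pos (Nat.le_sqrt.mp (by omega))]
    rw [Finset.sum_congr rfl hstep]
    have hsub : Finset.Ico 2 (N.sqrt + 1) ⊆ Finset.Ico 2 (N + 2) := by
      apply Finset.Ico_subset_Ico (le_refl 2)
      have := Nat.sqrt_le_self N; omega
    rw [Finset.sum_subset hsub (by
      intro j hj hnj
      rw [Finset.mem_Ico] at hj
      have hgt : N.sqrt + 1 ≤ j := by
        by_contra h
        exact hnj (Finset.mem_Ico.mpr ⟨hj.1, by omega⟩)
      have hlt : N < j * j := Nat.sqrt_lt.mp (by omega)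
      rw [if_neg (by omega)])]
    rw [Finset.sum_Ico_eq_sum_range]
    simp only [Nat.add_sub_cancel, Nat.add_comm 2]
  rw [hnat]
  push_cast
  congr 1
  apply Finset.sum_congr rfl
  intro k hk
  have hc : (2 : Int) + (k : Int) = ((2 + k : Nat) : Int) := by push_cast; ring
  rw [hc]
  by_cases hsq : (2+k) * (2+k) ≤ N
  · rw [if_pos (by exact_mod_cast hsq), if_pos hsq]
    by_cases hdvd : (2+k) ∣ N
    · rw [if_pos (by rw [PySem.Int.mod_eq_zero_iff_dvd, Int.natCast_dvd_natCast]; exact hdvd),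
          if_pos hdvd]
      rw [PySem.Int.floordiv_natCast]
      by_cases hne : N / (2+k) ≠ 2+k
      · rw [if_pos (by exact_mod_cast hne), if_pos hne]; push_cast; ring
      · rw [if_neg (by simp [not_not.mp hne]), if_neg hne]
    · rw [if_neg (by rw [PySem.Int.mod_eq_zero_iff_dvd, Int.natCast_dvd_natCast]; exact hdvd),
          if_neg hdvd]
  · rw [if_neg (by exact_mod_cast hsq), if_neg hsq]

-- the crux: for 2 ≤ a both proper-divisor sums agree
lemma key (a : Int) (ha : 2 ≤ a) : naiveSum a = proper_div_sum a := by
  obtain ⟨N, rfl⟩ : ∃ N : Nat, a = (N : Int) := ⟨a.toNat, by omega⟩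
  have h2 : 2 ≤ N := by exact_mod_cast ha
  rw [naiveSum_eq N (by omega), proper_div_sum_eq N h2, ← core_sum N h2]

-- ===== VERDICT (by name: the statement is the Claim_ definition above) =====
theorem suma_n_perf_spec : Claim_equal_suma_n_perf := by
  intro n _
  unfold Spec_suma_n_perf suma_n_perf suma_n_perf_alt
  by_cases hn : 1 < n
  · rw [PySem.List.pyRange_one_cons (by omega : (1:Int) < n)]
    simp only [List.foldl_cons]
    have h1 : numero_perfecto 1 = false := by decide
    rw [h1]
    simp only [Bool.false_eq_true, if_false]
    apply PySem.List.foldl_congr_mem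
    intro acc x hx
    have hx2 : 2 ≤ x := (PySem.List.mem_pyRange_one.mp hx).1
    rw [numero_perfecto_eq, key x hx2]
    by_cases h : proper_div_sum x = x <;> simp [h]
  · rw [PySem.List.pyRange_one_eq_nil (by omega : n ≤ 1),
        PySem.List.pyRange_one_eq_nil (by omega : n ≤ 2)]
    rfl
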